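-- pv_equiv track=rewrite | github.com/Zinkov/Mid-Exam_exercise | 01. Cooking_mastercalss.py | flour_cost
-- ===== SOURCE A (Python) =====
-- def flour_cost(price, students):
--     total_price = 0
--     for x in range(1, students + 1):
--         if x % 5 == 0:
--             total_price += 0
--         else:
--             total_price += price
--     return total_price
-- ===== SOURCE B (Python) =====
-- def flour_cost(price, students):
--     s = max(students, 0)
--     return price * (s - s // 5)
-- ===== Notes on version B (the rewrite author's own statement) =====
-- stated objective: faster
-- what changed: Replaced the per-student loop with the closed form price * (s - s//5), where s = max(students, 0).
import Mathlib
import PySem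

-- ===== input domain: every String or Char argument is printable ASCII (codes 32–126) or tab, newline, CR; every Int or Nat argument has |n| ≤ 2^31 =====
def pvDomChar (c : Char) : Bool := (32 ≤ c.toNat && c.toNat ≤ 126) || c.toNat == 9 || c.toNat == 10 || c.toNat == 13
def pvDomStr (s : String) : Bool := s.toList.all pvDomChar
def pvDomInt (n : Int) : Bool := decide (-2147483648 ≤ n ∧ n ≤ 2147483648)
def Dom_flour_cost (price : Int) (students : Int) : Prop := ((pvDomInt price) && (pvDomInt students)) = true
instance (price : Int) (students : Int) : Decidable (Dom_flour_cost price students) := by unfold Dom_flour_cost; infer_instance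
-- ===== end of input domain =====

-- B replaces A's per-student loop by the closed form price * (s - s//5); objective: faster (O(1) vs O(n)).

-- ===== PORT A =====
def flour_cost (price : Int) (students : Int) : Int :=
  (PySem.List.pyRange 1 (students + 1) 1).foldl
    (fun total_price x =>
      if PySem.Int.mod x 5 == 0 then total_price + 0 else total_price + price) 0

-- ===== PORT B =====
def flour_cost_alt (price : Int) (students : Int) : Int :=
  price * (max students 0 - PySem.Int.floordiv (max students 0) 5)

-- ===== PRECONDITION & SPEC =====
def Spec_flour_cost (price : Int) (students : Int) (out : Int) : Prop := out = flour_cost_alt price students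
instance (price : Int) (students : Int) (out : Int) : Decidable (Spec_flour_cost price students out) := by unfold Spec_flour_cost; infer_instance

-- ===== CLAIM (what is proved, stated in full; the proofs are below) =====
def Claim_equal_flour_cost : Prop := ∀ (price : Int) (students : Int), Dom_flour_cost price students → Spec_flour_cost price students (flour_cost price students)

-- ===== LEMMAS AND PROOFS =====

-- loop invariant: the fold over range(1, n+1) equals the closed form, by induction on n
lemma flour_loop_closed (price : Int) (n : Nat) :
    (PySem.List.pyRange 1 ((n : Int) + 1) 1).foldl
      (fun total_price x =>
        if PySem.Int.mod x 5 == 0 then total_price + 0 else total_price + price) 0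
      = price * ((n : Int) - (n : Int) / 5) := by
  induction n with
  | zero => simp [PySem.List.pyRange_one_eq_nil]
  | succ k ih =>
    have hsplit : PySem.List.pyRange 1 ((k : Int) + 1 + 1) 1
        = PySem.List.pyRange 1 ((k : Int) + 1) 1 ++ [(k : Int) + 1] :=
      PySem.List.pyRange_one_succ_right (by omega)
    push_cast
    rw [hsplit, List.foldl_append, ih]
    simp only [List.foldl_cons, List.foldl_nil]
    rw [PySem.Int.mod_eq_emod_of_pos (by omega)]
    by_cases h5 : ((k : Int) + 1) % 5 = 0
    · have hq : ((k : Int) + 1) / 5 = (k : Int) / 5 + 1 := by omega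
      simp only [h5, beq_self_eq_true, if_true, hq]
      ring
    · have hb : (((k : Int) + 1) % 5 == 0) = false := by simp [h5]
      have hq : ((k : Int) + 1) / 5 = (k : Int) / 5 := by omega
      rw [hb]
      simp only [Bool.false_eq_true, if_false, hq]
      ring

-- ===== VERDICT (by name: the statement is the Claim_ definition above) =====
theorem flour_cost_spec : Claim_equal_flour_cost := by
  intro price students _
  unfold Spec_flour_cost flour_cost flour_cost_alt
  by_cases hs : 0 ≤ students
  · obtain ⟨n, rfl⟩ := Int.eq_ofNat_of_zero_le hs
    rw [max_eq_left hs, PySem.Int.floordiv_eq_ediv_of_pos (show (0:Int) < 5 by omega)]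
    exact flour_loop_closed price n
  · rw [PySem.List.pyRange_one_eq_nil (by omega)]
    simp [max_eq_right (le_of_not_ge hs)]
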